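-- pv_equiv track=rewrite | github.com/BoghosYouseef/thesis_sourcecode | src/utils/utils.py | create_diamond_shape_using_powers_of_two
-- ===== SOURCE A (Python) =====
-- def isEven(n):
--     return n % 2 == 0
--
-- def create_diamond_shape_using_powers_of_two(starting_num_neurons,n):
--     result = []
--     if isEven(n=n):
--         first_half = [starting_num_neurons*2**i for i in range(n)]
--         second_half = [starting_num_neurons*2**i for i in range(n, -1, -1)]
--         result =  first_half + second_half
--     else:
--         first_half = [starting_num_neurons*2**i for i in range(n+1)]
--         second_half = [starting_num_neurons*2**i for i in range(n-1, -1, -1)]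
--         result =  first_half + second_half
--     return result
-- ===== SOURCE B (Python) =====
-- def create_diamond_shape_using_powers_of_two(starting_num_neurons, n):
--     # Closed form by output index: the diamond has 2n+1 entries and entry i
--     # is starting_num_neurons * 2**(n - |n - i|); one pass, no halves, no parity branch.
--     return [starting_num_neurons * 2 ** (n - abs(n - i)) for i in range(2 * n + 1)]
-- ===== Notes on version B (the rewrite author's own statement) =====
-- stated objective: simpler
-- what changed: Replaces A's parity branch and two concatenated half-list comprehensions by a single closed-form comprehension over all 2n+1 output indices, computing entry i directly as s*2**(n-|n-i|).
import Mathlib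
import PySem

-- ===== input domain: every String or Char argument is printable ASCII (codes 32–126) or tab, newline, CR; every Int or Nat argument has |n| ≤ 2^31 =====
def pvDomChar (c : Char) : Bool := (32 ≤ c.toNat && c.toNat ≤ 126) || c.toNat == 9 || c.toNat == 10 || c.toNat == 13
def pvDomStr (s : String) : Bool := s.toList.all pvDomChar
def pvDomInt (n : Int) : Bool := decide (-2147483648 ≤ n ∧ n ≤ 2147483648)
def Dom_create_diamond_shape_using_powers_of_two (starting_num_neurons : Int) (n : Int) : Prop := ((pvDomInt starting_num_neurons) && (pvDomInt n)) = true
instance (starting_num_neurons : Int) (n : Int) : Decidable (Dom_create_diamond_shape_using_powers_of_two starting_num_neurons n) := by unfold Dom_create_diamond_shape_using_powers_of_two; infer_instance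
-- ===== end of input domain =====

-- B replaces A's parity branch and two half-list comprehensions by one closed-form
-- comprehension over all 2n+1 output indices (simpler).

-- ===== PORT A =====
def isEven (n : Int) : Bool := PySem.Int.mod n 2 == 0

def create_diamond_shape_using_powers_of_two (starting_num_neurons : Int) (n : Int) : List Int :=
  if isEven n then
    let first_half := (PySem.List.pyRange 0 n 1).map (fun i => starting_num_neurons * 2 ^ i.toNat)
    let second_half := (PySem.List.pyRange n (-1) (-1)).map (fun i => starting_num_neurons * 2 ^ i.toNat)
    first_half ++ second_half
  else
    let first_half := (PySem.List.pyRange 0 (n + 1) 1).map (fun i => starting_num_neurons * 2 ^ i.toNat)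
    let second_half := (PySem.List.pyRange (n - 1) (-1) (-1)).map (fun i => starting_num_neurons * 2 ^ i.toNat)
    first_half ++ second_half

-- ===== PORT B =====
-- abs(n - i) ported as (n - i).natAbs (Python abs on int); the exponent n - |n - i|
-- is nonnegative for every i in range(2n+1), so 2**e is an int there and .toNat is exact.
def create_diamond_shape_using_powers_of_two_alt (starting_num_neurons : Int) (n : Int) : List Int :=
  (PySem.List.pyRange 0 (2 * n + 1) 1).map
    (fun i => starting_num_neurons * 2 ^ (n - ((n - i).natAbs : Int)).toNat)

-- ===== PRECONDITION & SPEC =====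
def Spec_create_diamond_shape_using_powers_of_two (starting_num_neurons : Int) (n : Int) (out : List Int) : Prop := out = create_diamond_shape_using_powers_of_two_alt starting_num_neurons n
instance (starting_num_neurons : Int) (n : Int) (out : List Int) : Decidable (Spec_create_diamond_shape_using_powers_of_two starting_num_neurons n out) := by unfold Spec_create_diamond_shape_using_powers_of_two; infer_instance

-- ===== CLAIM (what is proved, stated in full; the proofs are below) =====
def Claim_equal_create_diamond_shape_using_powers_of_two : Prop := ∀ (starting_num_neurons : Int) (n : Int), Dom_create_diamond_shape_using_powers_of_two starting_num_neurons n → Spec_create_diamond_shape_using_powers_of_two starting_num_neurons n (create_diamond_shape_using_powers_of_two starting_num_neurons n)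

-- ===== LEMMAS AND PROOFS =====

-- Both of A's branches produce the canonical form asc(0..n) ++ desc(n-1..0);
-- B's single indexed pass splits at index n+1 into exactly those two pieces.
theorem pv_eq (s n : Int) :
    create_diamond_shape_using_powers_of_two s n = create_diamond_shape_using_powers_of_two_alt s n := by
  unfold create_diamond_shape_using_powers_of_two create_diamond_shape_using_powers_of_two_alt
  dsimp only
  by_cases hn : 0 ≤ n
  · -- B = asc(0..n) ++ desc(n-1..0)
    have hsplit : PySem.List.pyRange 0 (2 * n + 1) 1
        = PySem.List.pyRange 0 (n + 1) 1 ++ PySem.List.pyRange (n + 1) (2 * n + 1) 1 :=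
      PySem.List.pyRange_one_append 0 (n + 1) (2 * n + 1) (by omega) (by omega)
    have hfirst : (PySem.List.pyRange 0 (n + 1) 1).map
          (fun i => s * 2 ^ (n - ((n - i).natAbs : Int)).toNat)
        = (PySem.List.pyRange 0 (n + 1) 1).map (fun i => s * 2 ^ i.toNat) := by
      apply List.map_congr_left
      intro i hi
      rw [PySem.List.mem_pyRange_one] at hi
      have : (n - ((n - i).natAbs : Int)).toNat = i.toNat := by omega
      rw [this]
    have hsecond : (PySem.List.pyRange (n + 1) (2 * n + 1) 1).map
          (fun i => s * 2 ^ (n - ((n - i).natAbs : Int)).toNat)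
        = (PySem.List.pyRange (n - 1) (-1) (-1)).map (fun i => s * 2 ^ i.toNat) := by
      rw [PySem.List.pyRange_one, PySem.List.pyRange_neg_one]
      have hlen : (2 * n + 1 - (n + 1)).toNat = (n - 1 - (-1)).toNat := by omega
      rw [hlen]
      simp only [List.map_map]
      apply List.map_congr_left
      intro k _
      simp only [Function.comp]
      have : (n - ((n - (n + 1 + (k : Int))).natAbs : Int)).toNat = (n - 1 - (k : Int)).toNat := by
        omega
      rw [this]
    rw [hsplit, List.map_append, hfirst, hsecond]
    split
    · -- even branch: asc(0..n-1) ++ (n :: desc(n-1..0))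
      have h1 : PySem.List.pyRange 0 (n + 1) 1 = PySem.List.pyRange 0 n 1 ++ [n] := by
        simpa using PySem.List.pyRange_one_succ_right hn
      have h2 : PySem.List.pyRange n (-1) (-1) = n :: PySem.List.pyRange (n - 1) (-1) (-1) :=
        PySem.List.pyRange_neg_one_cons (by omega)
      rw [h1, h2]
      simp
    · rfl
  · -- n < 0: every range is empty on both sides
    have hB : PySem.List.pyRange 0 (2 * n + 1) 1 = [] :=
      PySem.List.pyRange_one_eq_nil (by omega)
    have h0 : PySem.List.pyRange 0 n 1 = [] :=
      PySem.List.pyRange_one_eq_nil (by omega)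
    have h1 : PySem.List.pyRange 0 (n + 1) 1 = [] :=
      PySem.List.pyRange_one_eq_nil (by omega)
    have h2 : PySem.List.pyRange n (-1) (-1) = [] :=
      PySem.List.pyRange_neg_one_eq_nil (by omega)
    have h3 : PySem.List.pyRange (n - 1) (-1) (-1) = [] :=
      PySem.List.pyRange_neg_one_eq_nil (by omega)
    split <;> simp [h0, h1, h2, h3, hB]

-- ===== VERDICT (by name: the statement is the Claim_ definition above) =====
theorem create_diamond_shape_using_powers_of_two_spec : Claim_equal_create_diamond_shape_using_powers_of_two := by
  intro s n _
  exact pv_eq s n
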